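-- pv_equiv track=rewrite | github.com/Pritamcts/Training-Module | TrainingModule/Training/process/model.py | refine_summary
-- ===== SOURCE A (Python) =====
-- def refine_summary(summary_text, target_words):
--     # Split the summary into sentences
--     sentences = summary_text.split('. ')
--
--     # Initialize variables
--     refined_summary = ''
--     word_count = 0
--
--     # Iterate through sentences and add them to the refined summary until target_words is reached
--     for sentence in sentences:
--         # Check if adding the next sentence would exceed the word limit
--         if word_count + len(sentence.split()) <= target_words:
--             refined_summary += sentence + '. '
--             word_count += len(sentence.split())
--         else:
--             break
--
--     return refined_summary.strip()  # Remove trailing whitespace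
-- ===== SOURCE B (Python) =====
-- def refine_summary(summary_text, target_words):
--     # Precompute cumulative word counts, then binary-search the largest prefix
--     # whose cumulative count fits (cumulative counts are nondecreasing, so the
--     # greedy cut-off point equals the maximal feasible prefix length).
--     sentences = summary_text.split('. ')
--     prefix = [0]
--     for s in sentences:
--         prefix.append(prefix[-1] + len(s.split()))
--     lo, hi = 0, len(sentences)
--     while lo < hi:
--         mid = (lo + hi + 1) // 2
--         if prefix[mid] <= target_words:
--             lo = mid
--         else:
--             hi = mid - 1
--     return ('. '.join(sentences[:lo]) + '. ').strip() if lo else ''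
-- ===== Notes on version B (the rewrite author's own statement) =====
-- stated objective: alternative
-- what changed: B precomputes the cumulative word-count table and then BINARY-SEARCHES it for the largest prefix whose cumulative count fits the target (valid because cumulative counts are nondecreasing), joining that prefix once, instead of A's single greedy loop that interleaves counting with incremental string concatenation.
import Mathlib
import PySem

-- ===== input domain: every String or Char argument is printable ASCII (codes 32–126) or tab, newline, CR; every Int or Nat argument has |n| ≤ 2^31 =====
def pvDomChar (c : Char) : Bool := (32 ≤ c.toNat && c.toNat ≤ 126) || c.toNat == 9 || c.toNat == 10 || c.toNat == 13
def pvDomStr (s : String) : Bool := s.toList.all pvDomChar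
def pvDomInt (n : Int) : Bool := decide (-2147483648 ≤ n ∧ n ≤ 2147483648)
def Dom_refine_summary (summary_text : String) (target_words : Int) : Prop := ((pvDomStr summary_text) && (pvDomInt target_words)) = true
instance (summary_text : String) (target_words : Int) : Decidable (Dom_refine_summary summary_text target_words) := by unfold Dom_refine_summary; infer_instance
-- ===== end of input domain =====

-- B replaces A's greedy accumulation loop by a cumulative word-count table plus a
-- binary search for the maximal feasible prefix; the return values are proved equal.

-- ===== PORT A =====
-- A's loop with break: recursion over the sentence list carrying the growing string and word count.
def pvLoopA (target_words : Int) : List String → String → Int → String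
  | [], refined, _ => refined
  | s :: rest, refined, wc =>
    if wc + ((PySem.Str.split₀ s).length : Int) ≤ target_words then
      pvLoopA target_words rest (refined ++ s ++ ". ") (wc + ((PySem.Str.split₀ s).length : Int))
    else refined

def refine_summary (summary_text : String) (target_words : Int) : String :=
  PySem.Str.strip (pvLoopA target_words ((PySem.Chars.splitOn summary_text.toList ". ".toList).map String.ofList) "" 0)

-- ===== PORT B =====
-- Source B's prefix-building loop body: prefix.append(prefix[-1] + len(s.split()))
def pvStep (acc : List Int) (s : String) : List Int :=
  acc ++ [acc.getLast! + ((PySem.Str.split₀ s).length : Int)]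

-- termination of the while loop: the bracket [lo, hi] shrinks (cited by name in decreasing_by)
theorem pvBS_mid_gt (lo hi : Nat) (h : lo < hi) : lo < (lo + hi + 1) / 2 :=
  Nat.lt_of_succ_le ((Nat.le_div_iff_mul_le (Nat.succ_pos 1)).mpr
    (calc (lo + 1) * 2 = lo + 1 + (lo + 1) := Nat.mul_two _
      _ ≤ lo + 1 + hi := Nat.add_le_add_left h _
      _ = lo + hi + 1 := Nat.add_right_comm _ _ _))

theorem pvBS_mid_le (lo hi : Nat) (h : lo < hi) : (lo + hi + 1) / 2 ≤ hi :=
  calc (lo + hi + 1) / 2 ≤ (2 * hi + 1) / 2 :=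
        Nat.div_le_div_right
          (Nat.add_le_add_right
            (le_of_le_of_eq (Nat.add_le_add_right (Nat.le_of_lt h) hi) (Nat.two_mul hi).symm) 1)
    _ = hi := le_antisymm (le_of_eq (Nat.mul_add_div (Nat.succ_pos 1) hi 1))
          (ge_of_eq (Nat.mul_add_div (Nat.succ_pos 1) hi 1))

theorem pvBS_dec1 (lo hi : Nat) (h : lo < hi) : hi - (lo + hi + 1) / 2 < hi - lo :=
  Nat.sub_lt_sub_left h (pvBS_mid_gt lo hi h)

theorem pvBS_dec2 (lo hi : Nat) (h : lo < hi) : (lo + hi + 1) / 2 - 1 - lo < hi - lo :=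
  Nat.sub_lt_sub_right (Nat.le_sub_one_of_lt (pvBS_mid_gt lo hi h))
    (Nat.lt_of_lt_of_le
      (Nat.sub_lt (Nat.lt_of_le_of_lt (Nat.zero_le lo) (pvBS_mid_gt lo hi h)) Nat.one_pos)
      (pvBS_mid_le lo hi h))

-- Source B's while loop (binary search); prefix[mid] is always in range (mid ≤ hi ≤ len(sentences)),
-- so getD's default is never read.
def pvBS (pre : List Int) (t : Int) (lo hi : Nat) : Nat :=
  if _h : lo < hi then
    let mid := (lo + hi + 1) / 2
    if pre.getD mid 0 ≤ t then pvBS pre t mid hi else pvBS pre t lo (mid - 1)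
  else lo
termination_by hi - lo
decreasing_by
  · exact pvBS_dec1 lo hi _h
  · exact pvBS_dec2 lo hi _h

def refine_summary_alt (summary_text : String) (target_words : Int) : String :=
  let sentences := (PySem.Chars.splitOn summary_text.toList ". ".toList).map String.ofList
  let pre := sentences.foldl pvStep [0]
  let lo := pvBS pre target_words 0 sentences.length
  if lo ≠ 0 then PySem.Str.strip (PySem.Str.join ". " (sentences.take lo) ++ ". ") else ""

-- ===== PRECONDITION & SPEC =====
def Spec_refine_summary (summary_text : String) (target_words : Int) (out : String) : Prop := out = refine_summary_alt summary_text target_words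
instance (summary_text : String) (target_words : Int) (out : String) : Decidable (Spec_refine_summary summary_text target_words out) := by unfold Spec_refine_summary; infer_instance

-- ===== CLAIM =====
def Claim_equal_refine_summary : Prop := ∀ (summary_text : String) (target_words : Int), Dom_refine_summary summary_text target_words → Spec_refine_summary summary_text target_words (refine_summary summary_text target_words)

-- ===== LEMMAS AND PROOFS =====

-- word count of one sentence, as A and B both compute it
def pvC (s : String) : Int := ((PySem.Str.split₀ s).length : Int)

-- cumulative word counts of the first k sentences
def pvS (ss : List String) (k : Nat) : Int := ((ss.take k).map pvC).sum

-- A's stopping point: how many leading sentences the greedy loop takes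
def pvGk (t : Int) : List String → Int → Nat
  | [], _ => 0
  | s :: r, total => if total + pvC s ≤ t then pvGk t r (total + pvC s) + 1 else 0

-- the string A has accumulated after taking a prefix of sentences
def pvConcatD : List String → String
  | [] => ""
  | s :: r => s ++ ". " ++ pvConcatD r

theorem pvConcatD_cons (s : String) (r : List String) :
    pvConcatD (s :: r) = s ++ ". " ++ pvConcatD r := rfl

theorem pvLoopA_eq (target_words : Int) (ss : List String) (acc : String) (wc : Int) :
    pvLoopA target_words ss acc wc = acc ++ pvConcatD (ss.take (pvGk target_words ss wc)) := by
  induction ss generalizing acc wc with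
  | nil =>
    simp only [pvLoopA, pvGk, List.take_nil, pvConcatD]
    exact String.append_empty.symm
  | cons s rest ih =>
    simp only [pvLoopA, pvGk, pvC]
    by_cases h : wc + ((PySem.Str.split₀ s).length : Int) ≤ target_words
    · simp only [if_pos h, ih, List.take_succ_cons, pvConcatD_cons]
      apply String.toList_injective; simp
    · simp [if_neg h, pvConcatD]

theorem pvJoin_dot (pre : List String) (h : pre ≠ []) :
    PySem.Str.join ". " pre ++ ". " = pvConcatD pre := by
  induction pre with
  | nil => exact absurd rfl h
  | cons a r ih =>
    cases r with
    | nil =>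
      apply String.toList_injective
      simp [PySem.Str.join, pvConcatD]
    | cons b r' =>
      rw [pvConcatD_cons, ← ih (by simp)]
      apply String.toList_injective
      simp [PySem.Str.join, PySem.Chars.join_cons_cons]

-- the cumulative list B's first loop builds, past the initial element
def pvCum (a : Int) : List String → List Int
  | [] => []
  | s :: r => (a + pvC s) :: pvCum (a + pvC s) r

theorem pvGetLastBang (l : List Int) (a : Int) : (l ++ [a]).getLast! = a := by
  induction l with
  | nil => rfl
  | cons x r ih =>
    have h2 : (x :: (r ++ [a])).getLast! = (r ++ [a]).getLast! := by
      cases h : r ++ [a] with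
      | nil => simp at h
      | cons y ys => rfl
    rw [List.cons_append, h2, ih]

theorem pvFold_eq (ss : List String) (acc : List Int) (a : Int) :
    List.foldl pvStep (acc ++ [a]) ss = acc ++ a :: pvCum a ss := by
  induction ss generalizing acc a with
  | nil => simp [pvCum]
  | cons s r ih =>
    simp only [List.foldl_cons, pvStep, pvGetLastBang]
    rw [ih (acc ++ [a]) (a + ((PySem.Str.split₀ s).length : Int))]
    simp [pvCum, pvC]

theorem pvGetD_cum (ss : List String) (a : Int) (j : Nat) (hj : j ≤ ss.length) :
    (a :: pvCum a ss).getD j 0 = a + pvS ss j := by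
  induction ss generalizing a j with
  | nil =>
    have : j = 0 := Nat.le_zero.mp hj
    subst this
    simp [pvS]
  | cons s r ih =>
    cases j with
    | zero => simp [pvS]
    | succ j =>
      have : j ≤ r.length := by simpa using hj
      simp only [pvCum, List.getD_cons_succ, ih (a + pvC s) j this, pvS, List.take_succ_cons,
        List.map_cons, List.sum_cons]
      ring

theorem pvC_nonneg (s : String) : 0 ≤ pvC s := by
  simp [pvC]

theorem pvS_mono (ss : List String) {j k : Nat} (h : j ≤ k) : pvS ss j ≤ pvS ss k := by
  obtain ⟨d, rfl⟩ := Nat.exists_eq_add_of_le h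
  unfold pvS
  rw [List.take_add, List.map_append, List.sum_append]
  have : 0 ≤ (((ss.drop j).take d).map pvC).sum := by
    apply List.sum_nonneg
    intro x hx
    obtain ⟨s, _, rfl⟩ := List.mem_map.mp hx
    exact pvC_nonneg s
  omega

-- greedy spec: pvGk never overruns the list
theorem pvGk_le (t : Int) (ss : List String) (total : Int) : pvGk t ss total ≤ ss.length := by
  induction ss generalizing total with
  | nil => simp [pvGk]
  | cons s r ih =>
    simp only [pvGk, List.length_cons]
    split
    · exact Nat.succ_le_succ (ih _)
    · omega

-- greedy spec: every nonempty prefix up to pvGk fits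
theorem pvGk_fits (t : Int) (ss : List String) (total : Int) :
    ∀ j, 1 ≤ j → j ≤ pvGk t ss total → total + pvS ss j ≤ t := by
  induction ss generalizing total with
  | nil => intro j h1 h2; simp [pvGk] at h2; omega
  | cons s r ih =>
    intro j h1 h2
    simp only [pvGk] at h2
    split at h2
    case isTrue h =>
      cases j with
      | zero => omega
      | succ j =>
        cases j with
        | zero => simpa [pvS] using h
        | succ j =>
          have := ih (total + pvC s) (j + 1) (by omega) (by omega)
          simp only [pvS, List.take_succ_cons, List.map_cons, List.sum_cons] at this ⊢
          omega
    case isFalse => omega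

-- greedy spec: the next sentence (if any) does not fit
theorem pvGk_stop (t : Int) (ss : List String) (total : Int)
    (h : pvGk t ss total < ss.length) : ¬ total + pvS ss (pvGk t ss total + 1) ≤ t := by
  induction ss generalizing total with
  | nil => simp at h
  | cons s r ih =>
    by_cases hc : total + pvC s ≤ t
    · simp only [pvGk, if_pos hc] at h ⊢
      have h' : pvGk t r (total + pvC s) < r.length := by simpa using h
      have := ih (total + pvC s) h'
      simp only [pvS, List.take_succ_cons, List.map_cons, List.sum_cons] at this ⊢
      omega
    · simp only [pvGk, if_neg hc] at h ⊢
      simp only [pvS, List.take_succ_cons, List.take_zero, List.map_cons, List.map_nil,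
        List.sum_cons, List.sum_nil]
      omega

-- the binary search lands exactly on the greedy stopping point
theorem pvBS_eq (ss : List String) (t : Int) (d lo hi : Nat) (hd : hi - lo ≤ d)
    (hhi : hi ≤ ss.length) (h1 : lo ≤ pvGk t ss 0) (h2 : pvGk t ss 0 ≤ hi) :
    pvBS (0 :: pvCum 0 ss) t lo hi = pvGk t ss 0 := by
  induction d generalizing lo hi with
  | zero =>
    rw [pvBS]
    rw [dif_neg (show ¬ lo < hi by omega)]
    omega
  | succ d ih =>
    rw [pvBS]
    by_cases hlt : lo < hi
    · rw [dif_pos hlt]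
      have hm1 : lo < (lo + hi + 1) / 2 := by omega
      have hm2 : (lo + hi + 1) / 2 ≤ hi := by omega
      have hmn : (lo + hi + 1) / 2 ≤ ss.length := le_trans hm2 hhi
      show (if (0 :: pvCum 0 ss).getD ((lo + hi + 1) / 2) 0 ≤ t then
              pvBS (0 :: pvCum 0 ss) t ((lo + hi + 1) / 2) hi
            else pvBS (0 :: pvCum 0 ss) t lo ((lo + hi + 1) / 2 - 1)) = pvGk t ss 0
      split
      next hc =>
        apply ih ((lo + hi + 1) / 2) hi (by omega) hhi _ h2
        rw [pvGetD_cum ss 0 _ hmn] at hc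
        by_contra hG
        have hGn : pvGk t ss 0 < ss.length := by omega
        have hstop := pvGk_stop t ss 0 hGn
        have hmono := pvS_mono ss (show pvGk t ss 0 + 1 ≤ (lo + hi + 1) / 2 by omega)
        omega
      next hc =>
        apply ih lo ((lo + hi + 1) / 2 - 1) (by omega) (by omega) h1
        rw [pvGetD_cum ss 0 _ hmn] at hc
        by_contra hG
        have hfit := pvGk_fits t ss 0 ((lo + hi + 1) / 2) (by omega) (by omega)
        omega
    · rw [dif_neg hlt]
      omega

-- ===== VERDICT =====
theorem refine_summary_spec : Claim_equal_refine_summary := by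
  intro summary_text target_words _
  unfold Spec_refine_summary refine_summary refine_summary_alt
  simp only []
  rw [pvLoopA_eq]
  set ss := (PySem.Chars.splitOn summary_text.toList ". ".toList).map String.ofList with hss
  have hfold : ss.foldl pvStep [0] = 0 :: pvCum 0 ss := pvFold_eq ss [] 0
  rw [hfold, pvBS_eq ss target_words ss.length 0 ss.length (by omega) le_rfl (Nat.zero_le _) (pvGk_le _ _ _)]
  show PySem.Str.strip ("" ++ pvConcatD (ss.take (pvGk target_words ss 0))) = _
  set G := pvGk target_words ss 0 with hG
  by_cases hG0 : G = 0
  · rw [if_neg (by simp [hG0])]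
    rw [hG0]
    show PySem.Str.strip ("" ++ pvConcatD []) = ""
    decide
  · rw [if_pos hG0]
    have hle : G ≤ ss.length := pvGk_le _ _ _
    have hne : ss.take G ≠ [] := by
      rw [Ne, List.take_eq_nil_iff]
      rintro (h | h)
      · exact hG0 h
      · rw [h] at hle; simp at hle; omega
    rw [pvJoin_dot _ hne]
    congr 1
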